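-- pv_equiv track=rewrite | github.com/danielorsa/poker | poker.py | look_for_suit
-- ===== SOURCE A (Python) =====
-- def look_for_suit(sub_hand):
--     spades = 0
--     diamonds = 0
--     hearts = 0
--     clubs = 0
--     for i in range(len(sub_hand)):
--         if sub_hand[i][-1] == "S":
--             spades += 1
--         elif sub_hand[i][-1] == "D":
--             diamonds += 1
--         elif sub_hand[i][-1] == "H":
--             hearts += 1
--         elif sub_hand[i][-1] == "C":
--             clubs += 1
--
--     strength = max(spades, diamonds, hearts, clubs)
--
--     if strength == spades:
--         suit = "S"
--     elif strength == diamonds: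
--         suit = "D"
--     elif strength == hearts:
--         suit = "H"
--     elif strength == clubs:
--         suit = "C"
--
--     best_subhand = []
--     for i in range(len(sub_hand)):
--         if sub_hand[i][-1] == suit:
--             best_subhand.append(sub_hand[i])
--
--     return best_subhand
-- ===== SOURCE B (Python) =====
-- def look_for_suit(sub_hand):
--     s_cards, d_cards, h_cards, c_cards = [], [], [], []
--     for card in sub_hand:
--         suit = card[-1]
--         if suit == "S":
--             s_cards.append(card)
--         elif suit == "D":
--             d_cards.append(card)
--         elif suit == "H":
--             h_cards.append(card)
--         elif suit == "C":
--             c_cards.append(card)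
--     best = []
--     for group in (s_cards, d_cards, h_cards, c_cards):
--         if len(group) > len(best):
--             best = group
--     return best
-- ===== Notes on version B (the rewrite author's own statement) =====
-- stated objective: simpler
-- what changed: B groups the cards by suit in a single pass and then picks the longest group in the fixed S,D,H,C order with a strict '>' scan, instead of A's counting pass + max + suit-name selection + second filtering pass over the hand.
import Mathlib
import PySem

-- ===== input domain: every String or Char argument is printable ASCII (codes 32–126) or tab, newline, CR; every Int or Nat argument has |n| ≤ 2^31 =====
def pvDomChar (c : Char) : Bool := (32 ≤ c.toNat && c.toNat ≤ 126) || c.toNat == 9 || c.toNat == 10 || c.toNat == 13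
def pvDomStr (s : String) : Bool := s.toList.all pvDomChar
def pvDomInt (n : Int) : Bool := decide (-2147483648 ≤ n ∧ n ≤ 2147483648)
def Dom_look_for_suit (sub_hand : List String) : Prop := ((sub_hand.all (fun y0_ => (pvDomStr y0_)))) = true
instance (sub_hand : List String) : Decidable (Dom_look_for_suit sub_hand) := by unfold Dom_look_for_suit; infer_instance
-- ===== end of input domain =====

-- B groups the cards by suit in one pass and picks the longest group in the fixed S,D,H,C
-- order, replacing A's count pass + max + suit selection + second filtering pass (objective: simpler).

-- ===== PORT A =====
-- counting loop of A: four counters over the hand (sub_hand[i][-1] = PySem.Str.pyGet? · (-1))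
def lfsCounts (sub_hand : List String) : Int × Int × Int × Int :=
  sub_hand.foldl (fun c s =>
    if PySem.Str.pyGet? s (-1) == some 'S' then (c.1 + 1, c.2.1, c.2.2.1, c.2.2.2)
    else if PySem.Str.pyGet? s (-1) == some 'D' then (c.1, c.2.1 + 1, c.2.2.1, c.2.2.2)
    else if PySem.Str.pyGet? s (-1) == some 'H' then (c.1, c.2.1, c.2.2.1 + 1, c.2.2.2)
    else if PySem.Str.pyGet? s (-1) == some 'C' then (c.1, c.2.1, c.2.2.1, c.2.2.2 + 1)
    else c) (0, 0, 0, 0)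

def look_for_suit (sub_hand : List String) : List String :=
  let c := lfsCounts sub_hand
  let spades := c.1
  let diamonds := c.2.1
  let hearts := c.2.2.1
  let clubs := c.2.2.2
  let strength := max spades (max diamonds (max hearts clubs))
  let suit : Char :=
    if strength = spades then 'S'
    else if strength = diamonds then 'D'
    else if strength = hearts then 'H'
    else 'C'
  sub_hand.foldl (fun best s =>
    if PySem.Str.pyGet? s (-1) == some suit then best ++ [s] else best) []

-- ===== PORT B =====
-- grouping loop of B: four suit lists built in one pass
def lfsGroups (sub_hand : List String) :
    List String × List String × List String × List String :=
  sub_hand.foldl (fun g card =>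
    if PySem.Str.pyGet? card (-1) == some 'S' then (g.1 ++ [card], g.2.1, g.2.2.1, g.2.2.2)
    else if PySem.Str.pyGet? card (-1) == some 'D' then (g.1, g.2.1 ++ [card], g.2.2.1, g.2.2.2)
    else if PySem.Str.pyGet? card (-1) == some 'H' then (g.1, g.2.1, g.2.2.1 ++ [card], g.2.2.2)
    else if PySem.Str.pyGet? card (-1) == some 'C' then (g.1, g.2.1, g.2.2.1, g.2.2.2 ++ [card])
    else g) ([], [], [], [])

def look_for_suit_alt (sub_hand : List String) : List String :=
  let g := lfsGroups sub_hand
  [g.1, g.2.1, g.2.2.1, g.2.2.2].foldl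
    (fun best group => if group.length > best.length then group else best) []

-- ===== PRECONDITION & SPEC =====
-- Pre_ excludes hands containing an empty string, on which Python's card[-1] raises IndexError in both A and B.
def Pre_look_for_suit (sub_hand : List String) : Prop := ∀ s ∈ sub_hand, s ≠ ""
instance (sub_hand : List String) : Decidable (Pre_look_for_suit sub_hand) := by
  unfold Pre_look_for_suit; infer_instance
def pvWitness_look_for_suit : List String := ["2S", "3D", "4D", "5H"]

def Spec_look_for_suit (sub_hand : List String) (out : List String) : Prop := out = look_for_suit_alt sub_hand
instance (sub_hand : List String) (out : List String) : Decidable (Spec_look_for_suit sub_hand out) := by unfold Spec_look_for_suit; infer_instance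

-- ===== CLAIM (what is proved, stated in full; the proofs are below) =====
def Claim_equal_look_for_suit : Prop := ∀ (sub_hand : List String), Dom_look_for_suit sub_hand → Pre_look_for_suit sub_hand → Spec_look_for_suit sub_hand (look_for_suit sub_hand)

-- ===== LEMMAS AND PROOFS =====

def lfsFilt (c : Char) (xs : List String) : List String :=
  xs.filter (fun s => PySem.Str.pyGet? s (-1) == some c)

theorem lfsCounts_eq (xs : List String) :
    lfsCounts xs = (((lfsFilt 'S' xs).length : Int), ((lfsFilt 'D' xs).length : Int),
      ((lfsFilt 'H' xs).length : Int), ((lfsFilt 'C' xs).length : Int)) := by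
  unfold lfsCounts
  suffices h : ∀ (l : List String) (c : Int × Int × Int × Int),
      l.foldl (fun c s =>
        if PySem.Str.pyGet? s (-1) == some 'S' then (c.1 + 1, c.2.1, c.2.2.1, c.2.2.2)
        else if PySem.Str.pyGet? s (-1) == some 'D' then (c.1, c.2.1 + 1, c.2.2.1, c.2.2.2)
        else if PySem.Str.pyGet? s (-1) == some 'H' then (c.1, c.2.1, c.2.2.1 + 1, c.2.2.2)
        else if PySem.Str.pyGet? s (-1) == some 'C' then (c.1, c.2.1, c.2.2.1, c.2.2.2 + 1)
        else c) c
      = (c.1 + (lfsFilt 'S' l).length, c.2.1 + (lfsFilt 'D' l).length,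
         c.2.2.1 + (lfsFilt 'H' l).length, c.2.2.2 + (lfsFilt 'C' l).length) by
    rw [h]; simp
  intro l
  induction l with
  | nil => intro c; simp [lfsFilt]
  | cons x t ih =>
    intro c
    rw [List.foldl_cons, ih]
    rcases hx : PySem.Str.pyGet? x (-1) with _ | ch <;>
      simp only [PySem.Str.pyGet?, PySem.Chars.pyGet?_eq_listPyGet?] at hx
    · simp [lfsFilt, hx]
    · by_cases h1 : ch = 'S'
      · subst h1; simp [lfsFilt, hx]; omega
      · by_cases h2 : ch = 'D'
        · subst h2; simp [lfsFilt, hx]; omega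
        · by_cases h3 : ch = 'H'
          · subst h3; simp [lfsFilt, hx]; omega
          · by_cases h4 : ch = 'C'
            · subst h4; simp [lfsFilt, hx]; omega
            · simp [lfsFilt, hx, h1, h2, h3, h4]

theorem lfsGroups_eq (xs : List String) :
    lfsGroups xs = (lfsFilt 'S' xs, lfsFilt 'D' xs, lfsFilt 'H' xs, lfsFilt 'C' xs) := by
  unfold lfsGroups
  suffices h : ∀ (l : List String) (g : List String × List String × List String × List String),
      l.foldl (fun g card =>
        if PySem.Str.pyGet? card (-1) == some 'S' then (g.1 ++ [card], g.2.1, g.2.2.1, g.2.2.2)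
        else if PySem.Str.pyGet? card (-1) == some 'D' then (g.1, g.2.1 ++ [card], g.2.2.1, g.2.2.2)
        else if PySem.Str.pyGet? card (-1) == some 'H' then (g.1, g.2.1, g.2.2.1 ++ [card], g.2.2.2)
        else if PySem.Str.pyGet? card (-1) == some 'C' then (g.1, g.2.1, g.2.2.1, g.2.2.2 ++ [card])
        else g) g
      = (g.1 ++ lfsFilt 'S' l, g.2.1 ++ lfsFilt 'D' l,
         g.2.2.1 ++ lfsFilt 'H' l, g.2.2.2 ++ lfsFilt 'C' l) by
    rw [h]; simp
  intro l
  induction l with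
  | nil => intro g; simp [lfsFilt]
  | cons x t ih =>
    intro g
    rw [List.foldl_cons, ih]
    rcases hx : PySem.Str.pyGet? x (-1) with _ | ch <;>
      simp only [PySem.Str.pyGet?, PySem.Chars.pyGet?_eq_listPyGet?] at hx
    · simp [lfsFilt, hx]
    · by_cases h1 : ch = 'S'
      · subst h1; simp [lfsFilt, hx]
      · by_cases h2 : ch = 'D'
        · subst h2; simp [lfsFilt, hx]
        · by_cases h3 : ch = 'H'
          · subst h3; simp [lfsFilt, hx]
          · by_cases h4 : ch = 'C'
            · subst h4; simp [lfsFilt, hx]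
            · simp [lfsFilt, hx, h1, h2, h3, h4]

theorem lfsSecondLoop (xs : List String) (suit : Char) :
    xs.foldl (fun best s =>
      if PySem.Str.pyGet? s (-1) == some suit then best ++ [s] else best) []
    = lfsFilt suit xs := by
  unfold lfsFilt
  rw [PySem.List.foldl_append_if]
  simp

-- ===== VERDICT (by name: the statement is the Claim_ definition above) =====
theorem look_for_suit_spec : Claim_equal_look_for_suit := by
  intro sub_hand _ _
  unfold Spec_look_for_suit look_for_suit look_for_suit_alt
  rw [lfsCounts_eq, lfsGroups_eq]
  simp only [List.foldl_cons, List.foldl_nil, lfsSecondLoop]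
  set fS := lfsFilt 'S' sub_hand with hfS
  set fD := lfsFilt 'D' sub_hand with hfD
  set fH := lfsFilt 'H' sub_hand with hfH
  set fC := lfsFilt 'C' sub_hand with hfC
  split_ifs <;> first | rfl | omega | simp_all
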